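-- pv_equiv track=rewrite | github.com/timdoesprog/Python-Algorithms | document_distance.py | split_string_into_words
-- ===== SOURCE A (Python) =====
-- def split_string_into_words(doc):
--     result = []
--     char_list = []
--     for char in doc:
--         if char.isalnum():
--             char_list.append(char)
--         elif len(char_list) > 0:
--             word = "".join(char_list)
--             word = word.lower()
--             result.append(word)
--             char_list = []
--     if len(char_list) > 0:
--         word = "".join(char_list)
--         word = word.lower()
--         result.append(word)
--         char_list = []
--     return result
-- ===== SOURCE B (Python) =====
-- def split_string_into_words(doc):
--     masked = "".join(c if c.isalnum() else " " for c in doc)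
--     return masked.lower().split()
-- ===== Notes on version B (the rewrite author's own statement) =====
-- stated objective: idiomatic
-- what changed: Replaces A's stateful accumulator loop with duplicated flush code by two staged passes: first build a masked copy of the string where every non-alphanumeric character becomes a space, then lowercase it and let str.split() (whitespace split) produce the words.
import Mathlib
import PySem

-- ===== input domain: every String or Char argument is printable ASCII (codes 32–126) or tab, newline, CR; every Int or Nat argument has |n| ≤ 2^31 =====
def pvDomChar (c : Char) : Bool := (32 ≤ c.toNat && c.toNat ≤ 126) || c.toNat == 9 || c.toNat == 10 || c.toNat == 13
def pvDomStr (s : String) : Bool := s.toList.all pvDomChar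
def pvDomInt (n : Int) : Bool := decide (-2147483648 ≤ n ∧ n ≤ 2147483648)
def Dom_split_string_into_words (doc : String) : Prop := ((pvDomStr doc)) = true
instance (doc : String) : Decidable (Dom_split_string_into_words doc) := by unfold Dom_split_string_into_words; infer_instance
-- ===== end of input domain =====

-- B replaces A's stateful accumulator loop by two staged passes: mask non-alnum chars to spaces, then lowercase and whitespace-split (idiomatic; same cost).

-- ===== PORT A =====
-- "".join(char_list).lower()
def pvEmit (buf : List Char) : String := PySem.Str.lower (String.ofList buf)

-- one iteration of A's for-loop body over state (result, char_list)
def pvAStep (st : List String × List Char) (c : Char) : List String × List Char :=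
  if PySem.Chars.isalnum c then (st.1, st.2 ++ [c])
  else if st.2.length > 0 then (st.1 ++ [pvEmit st.2], [])
  else st

def split_string_into_words (doc : String) : List String :=
  let st := doc.toList.foldl pvAStep ([], [])
  if st.2.length > 0 then st.1 ++ [pvEmit st.2] else st.1

-- ===== PORT B =====
-- c if c.isalnum() else " "
def pvMask (c : Char) : Char := if PySem.Chars.isalnum c then c else ' '

def split_string_into_words_alt (doc : String) : List String :=
  PySem.Str.split₀ (PySem.Str.lower (String.ofList (doc.toList.map pvMask)))

-- ===== PRECONDITION & SPEC =====
def Spec_split_string_into_words (doc : String) (out : List String) : Prop := out = split_string_into_words_alt doc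
instance (doc : String) (out : List String) : Decidable (Spec_split_string_into_words doc out) := by unfold Spec_split_string_into_words; infer_instance

-- ===== CLAIM (what is proved, stated in full; the proofs are below) =====
def Claim_equal_split_string_into_words : Prop := ∀ (doc : String), Dom_split_string_into_words doc → Spec_split_string_into_words doc (split_string_into_words doc)

-- ===== LEMMAS AND PROOFS =====

-- A's loop (plus final flush) as structural recursion, emitting the lowered char-list of each word
def pvRunA : List Char → List Char → List (List Char)
  | [], buf => if buf.length > 0 then [PySem.Chars.lower buf] else []
  | c :: cs, buf =>
    if PySem.Chars.isalnum c then pvRunA cs (buf ++ [c])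
    else if buf.length > 0 then PySem.Chars.lower buf :: pvRunA cs []
    else pvRunA cs []

lemma pvEmit_eq (buf : List Char) : pvEmit buf = String.ofList (PySem.Chars.lower buf) := by
  simp [pvEmit, PySem.Str.lower]

lemma pvFold_eq_runA (l : List Char) : ∀ (res : List String) (buf : List Char),
    (let st := l.foldl pvAStep (res, buf);
     if st.2.length > 0 then st.1 ++ [pvEmit st.2] else st.1) =
      res ++ (pvRunA l buf).map String.ofList := by
  induction l with
  | nil =>
    intro res buf
    simp only [List.foldl, pvRunA]
    split_ifs <;> simp [pvEmit_eq]
  | cons c cs ih =>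
    intro res buf
    simp only [List.foldl, pvAStep, pvRunA]
    by_cases h : PySem.Chars.isalnum c
    · simp [h, ih]
    · by_cases hb : buf.length > 0
      · have h2 := ih (res ++ [pvEmit buf]) []
        simp only [pvEmit_eq] at h2
        simp only [pvEmit_eq]
        simp [h, hb, h2]
      · have hb' : buf = [] := by cases buf <;> simp_all
        subst hb'
        simp [h, ih]

-- an alnum char stays non-whitespace after lowercasing
lemma pvIsupper_iff (c : Char) : PySem.Chars.isupper c = true ↔ 65 ≤ c.toNat ∧ c.toNat ≤ 90 := by
  simp only [PySem.Chars.isupper, Bool.and_eq_true, decide_eq_true_eq, Char.le_def,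
    UInt32.le_iff_toNat_le]
  rfl

lemma pvIslower_iff (c : Char) : PySem.Chars.islower c = true ↔ 97 ≤ c.toNat ∧ c.toNat ≤ 122 := by
  simp only [PySem.Chars.islower, Bool.and_eq_true, decide_eq_true_eq, Char.le_def,
    UInt32.le_iff_toNat_le]
  rfl

lemma pvIsdigit_iff (c : Char) : PySem.Chars.isdigit c = true ↔ 48 ≤ c.toNat ∧ c.toNat ≤ 57 := by
  simp only [PySem.Chars.isdigit, Bool.and_eq_true, decide_eq_true_eq, Char.le_def,
    UInt32.le_iff_toNat_le]
  rfl

lemma pvNotSpace (d : Char) (hd : 48 ≤ d.toNat) (hd' : d.toNat ≤ 122) :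
    PySem.Chars.isspace d = false := by
  simp [PySem.Chars.isspace]
  omega

lemma pvNotSpace_of_alnum (c : Char) (h : PySem.Chars.isalnum c = true) :
    PySem.Chars.isspace (PySem.Chars.lowerChar c) = false := by
  simp only [PySem.Chars.isalnum, PySem.Chars.isalpha, Bool.or_eq_true] at h
  simp only [PySem.Chars.lowerChar]
  rcases h with (h | h) | h
  · -- uppercase: lowered to c.toNat + 32 ∈ [97,122]
    rcases (pvIsupper_iff c).mp h with ⟨h1, h2⟩
    rw [if_pos h]
    have hv : Nat.isValidChar (c.toNat + 32) := Or.inl (by omega)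
    have hto : (Char.ofNat (c.toNat + 32)).toNat = c.toNat + 32 := by
      unfold Char.ofNat
      rw [dif_pos hv]
      rfl
    exact pvNotSpace _ (by omega) (by omega)
  · -- lowercase: unchanged, ∈ [97,122]
    rcases (pvIslower_iff c).mp h with ⟨h1, h2⟩
    rw [if_neg (by rw [pvIsupper_iff]; omega)]
    exact pvNotSpace c (by omega) (by omega)
  · -- digit: unchanged, ∈ [48,57]
    rcases (pvIsdigit_iff c).mp h with ⟨h1, h2⟩
    rw [if_neg (by rw [pvIsupper_iff]; omega)]
    exact pvNotSpace c (by omega) (by omega)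

lemma pvMaskLower_alnum (c : Char) (h : PySem.Chars.isalnum c = true) :
    PySem.Chars.lowerChar (pvMask c) = PySem.Chars.lowerChar c := by
  simp [pvMask, h]

lemma pvMaskLower_not_alnum (c : Char) (h : ¬ PySem.Chars.isalnum c = true) :
    PySem.Chars.lowerChar (pvMask c) = ' ' := by
  simp [pvMask, h]
  decide

-- split₀'s worker on the masked-and-lowered chars computes exactly A's loop
lemma pvGo_eq_runA (l : List Char) : ∀ (buf : List Char) (acc : List (List Char)),
    PySem.Chars.split₀.go ((l.map pvMask).map PySem.Chars.lowerChar)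
        (PySem.Chars.lower buf).reverse acc =
      acc.reverse ++ pvRunA l buf := by
  induction l with
  | nil =>
    intro buf acc
    simp only [List.map_nil, PySem.Chars.split₀.go, pvRunA]
    by_cases hb : buf.length > 0
    · have : ((PySem.Chars.lower buf).reverse).isEmpty = false := by
        cases buf <;> simp_all [PySem.Chars.lower]
      simp [this, hb]
    · have hb' : buf = [] := by cases buf <;> simp_all
      subst hb'
      simp [PySem.Chars.lower]
  | cons c cs ih =>
    intro buf acc
    simp only [List.map_cons, PySem.Chars.split₀.go]
    by_cases h : PySem.Chars.isalnum c
    · rw [pvMaskLower_alnum c h, pvNotSpace_of_alnum c h]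
      have : PySem.Chars.lowerChar c :: (PySem.Chars.lower buf).reverse =
          (PySem.Chars.lower (buf ++ [c])).reverse := by
        simp [PySem.Chars.lower]
      simp only [Bool.false_eq_true, if_false, this, ih (buf ++ [c]) acc, pvRunA, h, if_pos]
    · rw [pvMaskLower_not_alnum c h]
      have hsp : PySem.Chars.isspace ' ' = true := by decide
      by_cases hb : buf.length > 0
      · have hne : ((PySem.Chars.lower buf).reverse).isEmpty = false := by
          cases buf <;> simp_all [PySem.Chars.lower]
        have hih := ih [] ((PySem.Chars.lower buf).reverse.reverse :: acc)
        simp only [PySem.Chars.lower, List.map_nil, List.reverse_nil, List.reverse_reverse,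
          List.map_map, List.reverse_cons, List.append_assoc, List.singleton_append] at hih
        simp only [hsp, if_pos, hne, Bool.false_eq_true, if_false]
        simp only [PySem.Chars.lower, List.reverse_reverse, List.map_map] at *
        rw [hih]
        simp [pvRunA, h, hb, PySem.Chars.lower]
      · have hb' : buf = [] := by cases buf <;> simp_all
        subst hb'
        have hih := ih [] acc
        simp only [PySem.Chars.lower, List.map_nil, List.reverse_nil, List.map_map] at hih
        simp only [hsp, if_pos, PySem.Chars.lower, List.map_nil, List.map_map]
        rw [hih]
        simp [pvRunA, h]

-- ===== VERDICT (by name: the statement is the Claim_ definition above) =====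
theorem split_string_into_words_spec : Claim_equal_split_string_into_words := by
  intro doc _
  unfold Spec_split_string_into_words split_string_into_words split_string_into_words_alt
  rw [pvFold_eq_runA doc.toList [] []]
  have hgo := pvGo_eq_runA doc.toList [] []
  simp only [PySem.Chars.lower, List.map_nil, List.reverse_nil, List.map_map,
    List.nil_append] at hgo
  simp [PySem.Str.split₀, PySem.Chars.split₀, PySem.Str.lower, PySem.Chars.lower,
    List.map_map, hgo]
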